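-- pv_equiv track=rewrite | github.com/pypi-data/pypi-mirror-64 | packages/photostats/photostats-0.8.0-py3-none-any.whl/photostats/lenses.py | get_focal_length
-- ===== SOURCE A (Python) =====
-- from collections import Counter
--
-- def get_focal_length(exif_list: list) -> dict:
--     """Obtain focal length for each photo passed in.
--
--         :param exif_list: A list of photo exif metadata.
--         :returns: A Counter dictionary, counting the focal length of lenses.
--         """
--     focal_length_list = []
--     for data in exif_list:
--         pre_fixed_string = f"{data.get('Exif.Photo.FocalLength')}"
--         fixed_string = f"{pre_fixed_string[:pre_fixed_string.find('/')]}"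
--         try:
--             if int(fixed_string) > 1000:
--                 pass
--             else:
--                 focal_length_list.append(fixed_string)
--         except ValueError:
--             pass
--     return Counter(sorted(focal_length_list, key=int))
-- ===== SOURCE B (Python) =====
-- from collections import Counter
--
-- def get_focal_length(exif_list: list) -> dict:
--     """Count focal lengths: tally into a dict in one pass, then sort only the distinct keys."""
--     counts = {}
--     for data in exif_list:
--         pre_fixed_string = f"{data.get('Exif.Photo.FocalLength')}"
--         fixed_string = pre_fixed_string[:pre_fixed_string.find('/')]
--         try:
--             value = int(fixed_string)
--         except ValueError:
--             continue
--         if value <= 1000: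
--             counts[fixed_string] = counts.get(fixed_string, 0) + 1
--     result = Counter()
--     for key in sorted(counts, key=int):
--         result[key] = counts[key]
--     return result
-- ===== Notes on version B (the rewrite author's own statement) =====
-- stated objective: alternative
-- what changed: B tallies occurrences into a dict during the single pass and sorts only the distinct keys before rebuilding the Counter, instead of A's append-to-list, sort the whole list, then Counter.
import Mathlib
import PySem

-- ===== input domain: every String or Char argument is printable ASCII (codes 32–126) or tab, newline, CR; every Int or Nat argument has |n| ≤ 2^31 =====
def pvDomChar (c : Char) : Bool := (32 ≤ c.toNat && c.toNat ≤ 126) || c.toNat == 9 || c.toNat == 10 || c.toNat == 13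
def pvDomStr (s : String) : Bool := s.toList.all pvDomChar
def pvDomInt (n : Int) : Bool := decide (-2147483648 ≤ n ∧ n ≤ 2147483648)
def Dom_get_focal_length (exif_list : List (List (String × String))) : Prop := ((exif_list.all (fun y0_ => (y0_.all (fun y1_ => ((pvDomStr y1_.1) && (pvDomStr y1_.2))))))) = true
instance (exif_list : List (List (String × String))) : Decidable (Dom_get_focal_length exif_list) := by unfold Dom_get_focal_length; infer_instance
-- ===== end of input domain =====

-- B tallies occurrences into a dict during its single pass and sorts only the distinct keys
-- before rebuilding the Counter, instead of A's append-to-list / sort-the-whole-list / Counter.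

-- ===== PORT A =====
-- Shared per-element lines (identical in both Pythons):
--   pre_fixed_string = f"{data.get('Exif.Photo.FocalLength')}"   (None prints as "None")
--   fixed_string = pre_fixed_string[:pre_fixed_string.find('/')]
def pvFixed (data : List (String × String)) : String :=
  let pre_fixed_string := ((PySem.Dict.mk data).get? "Exif.Photo.FocalLength").getD "None"
  PySem.Str.slice pre_fixed_string none (some (PySem.Str.find pre_fixed_string "/"))

-- key=int of sorted(..., key=int): every string it is applied to was accepted by int() in the
-- loop, so the .getD 0 default is never taken.
def pvKey (s : String) : Int := (PySem.Int.ofStr? s).getD 0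

def get_focal_length (exif_list : List (List (String × String))) : List (String × Int) :=
  let focal_length_list := exif_list.foldl (fun acc data =>
    match PySem.Int.ofStr? (pvFixed data) with   -- try: int(fixed_string) … except ValueError: pass
    | none => acc
    | some n => if 1000 < n then acc else acc ++ [pvFixed data]) []
  (PySem.Dict.counter (PySem.List.sorted focal_length_list pvKey)).items

-- ===== PORT B =====
def get_focal_length_alt (exif_list : List (List (String × String))) : List (String × Int) :=
  let counts := exif_list.foldl (fun d data =>
    match PySem.Int.ofStr? (pvFixed data) with   -- try: value = int(fixed_string) … except: continue
    | none => d
    | some value => if value ≤ 1000 then d.insert (pvFixed data) (d.getD (pvFixed data) 0 + 1) else d)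
    (PySem.Dict.empty : PySem.Dict String Int)
  -- result = Counter(); for key in sorted(counts, key=int): result[key] = counts[key]
  -- (counts[key] never misses since key ∈ counts; getD 0 is the faithful total form)
  ((PySem.List.sorted counts.keys pvKey).foldl
    (fun r k => r.insert k (counts.getD k 0)) (PySem.Dict.empty : PySem.Dict String Int)).items

-- ===== PRECONDITION & SPEC =====
def Spec_get_focal_length (exif_list : List (List (String × String))) (out : List (String × Int)) : Prop := out = get_focal_length_alt exif_list
instance (exif_list : List (List (String × String))) (out : List (String × Int)) : Decidable (Spec_get_focal_length exif_list out) := by unfold Spec_get_focal_length; infer_instance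

-- ===== CLAIM (what is proved, stated in full; the proofs are below) =====
def Claim_equal_get_focal_length : Prop := ∀ (exif_list : List (List (String × String))), Dom_get_focal_length exif_list → Spec_get_focal_length exif_list (get_focal_length exif_list)

-- ===== LEMMAS AND PROOFS =====

-- the per-element contribution both loops make (none = skipped)
def pvValid (data : List (String × String)) : Option String :=
  match PySem.Int.ofStr? (pvFixed data) with
  | none => none
  | some n => if n ≤ 1000 then some (pvFixed data) else none

theorem pvA_loop (l : List (List (String × String))) (acc : List String) :
    l.foldl (fun acc data =>
      match PySem.Int.ofStr? (pvFixed data) with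
      | none => acc
      | some n => if 1000 < n then acc else acc ++ [pvFixed data]) acc
    = acc ++ l.filterMap pvValid := by
  induction l generalizing acc with
  | nil => rw [List.foldl_nil, List.filterMap_nil, List.append_nil]
  | cons d t ih =>
    rw [List.foldl_cons, List.filterMap_cons]
    cases h : PySem.Int.ofStr? (pvFixed d) with
    | none =>
      have hv : pvValid d = none := by rw [pvValid, h]
      rw [hv]
      exact ih acc
    | some n =>
      by_cases hn : 1000 < n
      · have hv : pvValid d = none := by rw [pvValid, h]; exact if_neg (by omega)
        rw [hv]
        show List.foldl _ (if 1000 < n then acc else acc ++ [pvFixed d]) t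
          = acc ++ List.filterMap pvValid t
        rw [if_pos hn]
        exact ih acc
      · have hv : pvValid d = some (pvFixed d) := by rw [pvValid, h]; exact if_pos (by omega)
        rw [hv]
        show List.foldl _ (if 1000 < n then acc else acc ++ [pvFixed d]) t
          = acc ++ pvFixed d :: List.filterMap pvValid t
        rw [if_neg hn, ih, List.append_assoc, List.singleton_append]

theorem pvB_loop (l : List (List (String × String))) (d0 : PySem.Dict String Int) :
    l.foldl (fun d data =>
      match PySem.Int.ofStr? (pvFixed data) with
      | none => d
      | some value => if value ≤ 1000 then d.insert (pvFixed data) (d.getD (pvFixed data) 0 + 1) else d) d0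
    = (l.filterMap pvValid).foldl (fun d x => d.insert x (d.getD x 0 + 1)) d0 := by
  induction l generalizing d0 with
  | nil => rw [List.foldl_nil, List.filterMap_nil, List.foldl_nil]
  | cons a t ih =>
    rw [List.foldl_cons, List.filterMap_cons]
    cases h : PySem.Int.ofStr? (pvFixed a) with
    | none =>
      have hv : pvValid a = none := by rw [pvValid, h]
      rw [hv]
      exact ih d0
    | some n =>
      by_cases hn : n ≤ 1000
      · have hv : pvValid a = some (pvFixed a) := by rw [pvValid, h]; exact if_pos hn
        rw [hv]
        show List.foldl _ (if n ≤ 1000 then d0.insert (pvFixed a) (d0.getD (pvFixed a) 0 + 1) else d0) t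
          = List.foldl _ d0 (pvFixed a :: List.filterMap pvValid t)
        rw [if_pos hn, List.foldl_cons]
        exact ih _
      · have hv : pvValid a = none := by rw [pvValid, h]; exact if_neg hn
        rw [hv]
        show List.foldl _ (if n ≤ 1000 then d0.insert (pvFixed a) (d0.getD (pvFixed a) 0 + 1) else d0) t
          = List.foldl _ d0 (List.filterMap pvValid t)
        rw [if_neg hn]
        exact ih d0

-- abbreviation for the comparison the insertion sort uses
def pvLt (a b : String) : Bool := decide (pvKey a < pvKey b)

theorem pv_add_mem (s : List String) (x : String) (hx : x ∈ s) :
    (PySem.Set.ofList s).add x = PySem.Set.ofList s := by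
  have hc : PySem.Set.contains (PySem.Set.ofList s) x = true :=
    (PySem.Set.contains_iff _ _).mpr ((PySem.Set.mem_ofList s x).mpr hx)
  rw [PySem.Set.add, if_pos hc]

theorem pv_add_not_mem (s : List String) (x : String) (hx : x ∉ s) :
    (PySem.Set.ofList s).add x = PySem.Set.ofList s ++ [x] := by
  have hc : PySem.Set.contains (PySem.Set.ofList s) x = false := by
    rcases h : PySem.Set.contains (PySem.Set.ofList s) x with _ | _
    · rfl
    · exact absurd ((PySem.Set.mem_ofList s x).mp ((PySem.Set.contains_iff _ _).mp h)) hx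
  rw [PySem.Set.add, if_neg (by rw [hc]; exact Bool.false_ne_true)]

theorem pv_insertBy_char (x : String) (s : List String) :
    PySem.List.insertBy pvLt x s
    = s.takeWhile (fun y => !pvLt x y) ++ x :: s.dropWhile (fun y => !pvLt x y) := by
  induction s with
  | nil => simp [PySem.List.insertBy]
  | cons y t ih =>
    by_cases h : pvLt x y = true
    · simp [PySem.List.insertBy, h]
    · simp only [Bool.not_eq_true] at h
      simp [PySem.List.insertBy, h, ih]

theorem pv_dropWhile_all_lt (x : String) (s : List String)
    (hs : s.Pairwise (fun a b => pvKey a ≤ pvKey b)) :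
    ∀ z ∈ s.dropWhile (fun y => !pvLt x y), pvKey x < pvKey z := by
  induction s with
  | nil => simp
  | cons y t ih =>
    rcases List.pairwise_cons.mp hs with ⟨hy, ht⟩
    by_cases h : pvLt x y = true
    · intro z hz
      rw [List.dropWhile_cons_of_neg (by simp [h])] at hz
      have hx : pvKey x < pvKey y := by simpa [pvLt] using h
      rcases List.mem_cons.mp hz with rfl | hz'
      · exact hx
      · exact lt_of_lt_of_le hx (hy z hz')
    · intro z hz
      rw [List.dropWhile_cons_of_pos (by simp [h])] at hz
      exact ih ht z hz

theorem pv_takeWhile_split (A B : List String) (p : String → Bool)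
    (hA : ∀ a ∈ A, p a = true) (hB : ∀ b ∈ B, p b = false) :
    (A ++ B).takeWhile p = A ∧ (A ++ B).dropWhile p = B := by
  induction A with
  | nil =>
    cases B with
    | nil => simp
    | cons b t =>
      have := hB b (by simp)
      simp [this]
  | cons a t ih =>
    have ha := hA a (by simp)
    have := ih (fun y hy => hA y (by simp [hy]))
    simp [ha, this]

-- dedup drops an insertBy-inserted element that was already present
theorem pv_ofList_insertBy_mem (x : String) (s : List String)
    (hs : s.Pairwise (fun a b => pvKey a ≤ pvKey b)) (hx : x ∈ s) :
    PySem.Set.ofList (PySem.List.insertBy pvLt x s) = PySem.Set.ofList s := by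
  set t := s.takeWhile (fun y => !pvLt x y) with ht
  set d := s.dropWhile (fun y => !pvLt x y) with hd
  have hxd : x ∉ d := by
    intro h
    exact absurd (pv_dropWhile_all_lt x s hs x h) (lt_irrefl _)
  have hxt : x ∈ t := by
    have hsplit := List.takeWhile_append_dropWhile (p := fun y => !pvLt x y) (l := s)
    rw [← hsplit] at hx
    rcases List.mem_append.mp hx with h | h
    · exact h
    · exact absurd h hxd
  rw [pv_insertBy_char, ← ht, ← hd]
  rw [PySem.Set.ofList_append, PySem.Set.update_cons, pv_add_mem t x hxt,
      ← PySem.Set.ofList_append, List.takeWhile_append_dropWhile]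

-- dedup commutes with inserting a genuinely new element
theorem pv_ofList_insertBy_not_mem (x : String) (s : List String)
    (hs : s.Pairwise (fun a b => pvKey a ≤ pvKey b)) (hx : x ∉ s) :
    PySem.Set.ofList (PySem.List.insertBy pvLt x s)
    = PySem.List.insertBy pvLt x (PySem.Set.ofList s) := by
  set p : String → Bool := fun y => !pvLt x y with hp
  set t := s.takeWhile p with ht
  set d := s.dropWhile p with hd
  have hstd : t ++ d = s := List.takeWhile_append_dropWhile
  have hxt : x ∉ t := fun h => hx (by rw [← hstd]; exact List.mem_append.mpr (Or.inl h))
  have hdlt : ∀ z ∈ d, pvKey x < pvKey z := pv_dropWhile_all_lt x s hs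
  have hL : PySem.Set.ofList (PySem.List.insertBy pvLt x s)
      = PySem.Set.ofList t ++ x :: (PySem.Set.ofList d).filter
          (fun y => !PySem.Set.contains (PySem.Set.ofList t) y) := by
    rw [pv_insertBy_char, ← ht, ← hd, PySem.Set.ofList_append, PySem.Set.update_cons,
        pv_add_not_mem t x hxt, PySem.Set.update_eq_append_filter]
    have hfil : ∀ y ∈ PySem.Set.ofList d,
        (PySem.Set.contains (PySem.Set.ofList t ++ [x]) y
          = PySem.Set.contains (PySem.Set.ofList t) y) := by
      intro y hy
      have hyx : y ≠ x := by
        intro h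
        subst h
        exact hx (by rw [← hstd]; exact List.mem_append.mpr (Or.inr ((PySem.Set.mem_ofList d y).mp hy)))
      simp [PySem.Set.contains, hyx]
    rw [List.filter_congr (fun y hy => by rw [hfil y hy])]
    simp
  have hR : PySem.List.insertBy pvLt x (PySem.Set.ofList s)
      = PySem.Set.ofList t ++ x :: (PySem.Set.ofList d).filter
          (fun y => !PySem.Set.contains (PySem.Set.ofList t) y) := by
    have hofs : PySem.Set.ofList s
        = PySem.Set.ofList t ++ (PySem.Set.ofList d).filter
            (fun y => !PySem.Set.contains (PySem.Set.ofList t) y) := by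
      rw [← hstd, PySem.Set.ofList_append, PySem.Set.update_eq_append_filter]
    have hAp : ∀ a ∈ PySem.Set.ofList t, p a = true := by
      intro a ha
      exact List.mem_takeWhile_imp (p := p) (l := s) (by rw [← ht] at *; exact (PySem.Set.mem_ofList t a).mp ha)
    have hBp : ∀ b ∈ (PySem.Set.ofList d).filter
        (fun y => !PySem.Set.contains (PySem.Set.ofList t) y), p b = false := by
      intro b hb
      have hbd : b ∈ d := (PySem.Set.mem_ofList d b).mp (List.mem_of_mem_filter hb)
      have := hdlt b hbd
      simp [hp, pvLt, this]
    rcases pv_takeWhile_split _ _ p hAp hBp with ⟨h1, h2⟩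
    rw [pv_insertBy_char, hofs, h1, h2]
  rw [hL, hR]

theorem pv_sorted_append_singleton (xs : List String) (x : String) :
    PySem.List.sorted (xs ++ [x]) pvKey
    = PySem.List.insertBy pvLt x (PySem.List.sorted xs pvKey) := by
  rw [PySem.List.sorted_eq_foldl_insertBy, PySem.List.sorted_eq_foldl_insertBy,
      List.foldl_append]
  rfl

-- dedup commutes with the stable sort
theorem pv_ofList_sorted (xs : List String) :
    PySem.Set.ofList (PySem.List.sorted xs pvKey)
    = PySem.List.sorted (PySem.Set.ofList xs) pvKey := by
  induction xs using List.reverseRecOn with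
  | nil => rfl
  | append_singleton ys y ih =>
    rw [pv_sorted_append_singleton, PySem.Set.ofList_append_singleton]
    have hpw := PySem.List.sorted_pairwise ys pvKey
    by_cases hy : y ∈ ys
    · have hys : y ∈ PySem.List.sorted ys pvKey := (PySem.List.mem_sorted ys pvKey false y).mpr hy
      rw [pv_ofList_insertBy_mem y _ hpw hys, ih, pv_add_mem ys y hy]
    · have hys : y ∉ PySem.List.sorted ys pvKey := fun h =>
        hy ((PySem.List.mem_sorted ys pvKey false y).mp h)
      rw [pv_ofList_insertBy_not_mem y _ hpw hys, ih, pv_add_not_mem ys y hy,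
          pv_sorted_append_singleton]

-- ===== VERDICT (by name: the statement is the Claim_ definition above) =====
theorem get_focal_length_spec : Claim_equal_get_focal_length := by
  intro exif_list _
  show get_focal_length exif_list = get_focal_length_alt exif_list
  unfold get_focal_length get_focal_length_alt
  rw [pvA_loop, pvB_loop, List.nil_append,
      PySem.Dict.foldl_insert_getD_add_one_eq_counter]
  show (PySem.Dict.counter (PySem.List.sorted (exif_list.filterMap pvValid) pvKey)).items
    = (List.foldl
        (fun r k => r.insert k ((PySem.Dict.counter (exif_list.filterMap pvValid)).getD k 0))
        PySem.Dict.empty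
        (PySem.List.sorted (PySem.Dict.counter (exif_list.filterMap pvValid)).keys pvKey)).items
  rw [PySem.Dict.keys_counter, PySem.Dict.items_counter, pv_ofList_sorted]
  have hkss : ((PySem.List.sorted (PySem.Set.ofList (exif_list.filterMap pvValid)) pvKey).map (fun k => k)).Nodup := by
    simpa using
      (PySem.List.sorted_perm (PySem.Set.ofList (exif_list.filterMap pvValid)) pvKey false).nodup_iff.mpr
        (PySem.Set.nodup_ofList (exif_list.filterMap pvValid))
  rw [PySem.Dict.items_foldl_insert_fresh
        (PySem.List.sorted (PySem.Set.ofList (exif_list.filterMap pvValid)) pvKey)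
        (fun k => k) (fun k => (PySem.Dict.counter (exif_list.filterMap pvValid)).getD k 0)
        PySem.Dict.empty
        (fun a _ => PySem.Dict.contains_empty a) hkss]
  have hempty : (PySem.Dict.empty : PySem.Dict String Int).items = [] := rfl
  rw [hempty, List.nil_append]
  apply List.map_congr_left
  intro k _
  rw [PySem.Dict.getD_counter,
      (PySem.List.sorted_perm (exif_list.filterMap pvValid) pvKey false).count_eq k]
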